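-- pv_equiv track=rewrite | github.com/unixbox-net/linux-tools | debian/email/mail-audit.py | parse_spf
-- ===== SOURCE A (Python) =====
-- from collections import defaultdict
-- from typing import Dict, List, Tuple, Optional, Set, Any
--
-- def _spf_tokens(spf: str) -> List[str]:
--     return [p.strip() for p in spf.split() if p.strip()]
--
-- def parse_spf(spf: str) -> Dict[str, List[str]]:
--     mech = defaultdict(list)
--     if not spf: return mech
--     for tok in _spf_tokens(spf)[1:]:
--         q = tok[1:] if tok[:1] in "+-~?" else tok
--         for key, pref in (("ip4","ip4:"),("ip6","ip6:"),("include","include:"),("exists","exists:")):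
--             if q.startswith(pref): mech[key].append(q[len(pref):]); break
--         else:
--             if   q == "mx": mech["mx"].append("mx")
--             elif q == "a":  mech["a"].append("a")
--             elif q.startswith("a:"):  mech["a"].append(q[2:])
--             elif q.startswith("mx:"): mech["mx"].append(q[3:])
--             elif q == "ptr": mech["ptr"].append("ptr")
--             elif q in ("all",): mech["all"].append("all")
--             elif q.startswith("redirect="): mech["redirect"].append(q.split("=",1)[1])
--             elif q.startswith("exp="):      mech["exp"].append(q.split("=",1)[1])
--     return mech
-- ===== SOURCE B (Python) =====
-- from collections import defaultdict
--
-- COLON = {"ip4", "ip6", "include", "exists", "a", "mx"}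
-- EQ = {"redirect", "exp"}
-- BARE = {"mx", "a", "ptr", "all"}
--
-- def parse_spf(spf):
--     mech = defaultdict(list)
--     for tok in spf.split()[1:]:
--         q = tok[1:] if tok[:1] in "+-~?" else tok
--         i = q.find(":")
--         j = q.find("=")
--         if i >= 0 and q[:i] in COLON:
--             mech[q[:i]].append(q[i + 1:])
--         elif j >= 0 and q[:j] in EQ:
--             mech[q[:j]].append(q[j + 1:])
--         elif q in BARE:
--             mech[q].append(q)
--     return mech
-- ===== Notes on version B (the rewrite author's own statement) =====
-- stated objective: simpler
-- what changed: Replaces A's per-token startswith/equality branch chain (plus an inner prefix loop with break/else) by a table-driven classifier: locate the first separator character, look the head word up in COLON/EQ membership sets, or the bare token in a BARE set, with one generic append rule per shape.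
import Mathlib
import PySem

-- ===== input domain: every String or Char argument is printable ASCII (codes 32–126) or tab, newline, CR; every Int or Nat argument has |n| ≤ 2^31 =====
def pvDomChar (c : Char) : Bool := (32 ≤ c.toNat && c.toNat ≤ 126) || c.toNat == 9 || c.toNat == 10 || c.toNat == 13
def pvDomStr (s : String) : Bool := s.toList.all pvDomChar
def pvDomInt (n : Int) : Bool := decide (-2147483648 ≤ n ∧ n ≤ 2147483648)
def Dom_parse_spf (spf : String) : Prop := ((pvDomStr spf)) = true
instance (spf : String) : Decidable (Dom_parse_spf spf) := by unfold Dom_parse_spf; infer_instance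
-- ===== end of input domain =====

-- B replaces A's per-token startswith/equality branch chain by a find-the-separator + set-lookup classifier (objective: simpler; same O(n) cost).

-- shared line of both Pythons: q = tok[1:] if tok[:1] in "+-~?" else tok
def pvStrip1 (tok : List Char) : List Char :=
  if PySem.Chars.isIn (PySem.List.slice tok none (some 1)) ['+', '-', '~', '?']
  then PySem.List.slice tok (some 1) none else tok
-- shared line of both Pythons: mech[key].append(v) on a defaultdict(list)
def pvAppend (mech : PySem.Dict String (List String)) (key : String) (v : String) :
    PySem.Dict String (List String) :=
  mech.insert key (mech.getD key [] ++ [v])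
-- ===== PORT A =====
-- the tuple of (key, pref) pairs of A's inner for-loop
def pvPrefixTable : List (String × List Char) :=
  [("ip4", "ip4:".toList), ("ip6", "ip6:".toList),
   ("include", "include:".toList), ("exists", "exists:".toList)]
-- A's inner for-loop with break/else: first matching prefix plus the stripped rest
def pvMatchPrefix (q : List Char) : List (String × List Char) → Option (String × List Char)
  | [] => none
  | (key, pref) :: rest =>
    if PySem.Chars.startswith q pref then
      some (key, PySem.List.slice q (some (pref.length : Int)) none)
    else pvMatchPrefix q rest
-- q.split("=", 1)[1]; A only evaluates it under a guard that puts '=' in q, so the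
-- wildcard row (Python's IndexError) is unreachable there
def pvSplitEqTail (q : List Char) : List Char :=
  match PySem.Chars.splitOnMax q ['='] 1 with
  | [_, t] => t
  | _ => []
def pvStepA (mech : PySem.Dict String (List String)) (tok : List Char) :
    PySem.Dict String (List String) :=
  let q := pvStrip1 tok
  match pvMatchPrefix q pvPrefixTable with
  | some (key, v) => pvAppend mech key (String.ofList v)
  | none =>
    if q = "mx".toList then pvAppend mech "mx" "mx"
    else if q = "a".toList then pvAppend mech "a" "a"
    else if PySem.Chars.startswith q "a:".toList then
      pvAppend mech "a" (String.ofList (PySem.List.slice q (some 2) none))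
    else if PySem.Chars.startswith q "mx:".toList then
      pvAppend mech "mx" (String.ofList (PySem.List.slice q (some 3) none))
    else if q = "ptr".toList then pvAppend mech "ptr" "ptr"
    else if q = "all".toList then pvAppend mech "all" "all"
    else if PySem.Chars.startswith q "redirect=".toList then
      pvAppend mech "redirect" (String.ofList (pvSplitEqTail q))
    else if PySem.Chars.startswith q "exp=".toList then
      pvAppend mech "exp" (String.ofList (pvSplitEqTail q))
    else mech
-- ===== PORT B =====
def pvCOLON : PySem.Set String := PySem.Set.ofList ["ip4", "ip6", "include", "exists", "a", "mx"]
def pvEQ : PySem.Set String := PySem.Set.ofList ["redirect", "exp"]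
def pvBARE : PySem.Set String := PySem.Set.ofList ["mx", "a", "ptr", "all"]
def pvStepB (mech : PySem.Dict String (List String)) (tok : List Char) :
    PySem.Dict String (List String) :=
  let q := pvStrip1 tok
  let i := PySem.Chars.find q [':']
  let j := PySem.Chars.find q ['=']
  if 0 ≤ i ∧ pvCOLON.contains (String.ofList (PySem.List.slice q none (some i))) then
    pvAppend mech (String.ofList (PySem.List.slice q none (some i)))
      (String.ofList (PySem.List.slice q (some (i + 1)) none))
  else if 0 ≤ j ∧ pvEQ.contains (String.ofList (PySem.List.slice q none (some j))) then
    pvAppend mech (String.ofList (PySem.List.slice q none (some j)))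
      (String.ofList (PySem.List.slice q (some (j + 1)) none))
  else if pvBARE.contains (String.ofList q) then
    pvAppend mech (String.ofList q) (String.ofList q)
  else mech


-- A: [p.strip() for p in spf.split() if p.strip()]
def pvTokensA (spf : String) : List (List Char) :=
  ((PySem.Chars.split₀ spf.toList).filter
      (fun p => !(PySem.Chars.strip p).isEmpty)).map PySem.Chars.strip

def parse_spf (spf : String) : List (String × List String) :=
  if spf = "" then (PySem.Dict.empty : PySem.Dict String (List String)).items
  else
    ((PySem.List.slice (pvTokensA spf) (some 1) none).foldl pvStepA PySem.Dict.empty).items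

def parse_spf_alt (spf : String) : List (String × List String) :=
  ((PySem.List.slice (PySem.Chars.split₀ spf.toList) (some 1) none).foldl
      pvStepB PySem.Dict.empty).items

-- ===== PRECONDITION & SPEC =====
def Spec_parse_spf (spf : String) (out : List (String × List String)) : Prop := out = parse_spf_alt spf
instance (spf : String) (out : List (String × List String)) : Decidable (Spec_parse_spf spf out) := by unfold Spec_parse_spf; infer_instance

-- ===== CLAIM (what is proved, stated in full; the proofs are below) =====
def Claim_equal_parse_spf : Prop := ∀ (spf : String), Dom_parse_spf spf → Spec_parse_spf spf (parse_spf spf)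

-- ===== LEMMAS AND PROOFS =====

lemma pv_singleton_infix {c : Char} {q : List Char} : [c] <:+: q ↔ c ∈ q := by
  constructor
  · intro h; exact List.singleton_sublist.mp h.sublist
  · intro h
    obtain ⟨s, t, rfl⟩ := List.append_of_mem h
    exact ⟨s, t, by simp⟩

lemma pv_find_first {c : Char} {w t : List Char} (hw : c ∉ w) :
    PySem.Chars.find (w ++ c :: t) [c] = (w.length : Int) := by
  have hmem : c ∈ w ++ c :: t := by simp
  have h0 : 0 ≤ PySem.Chars.find (w ++ c :: t) [c] :=
    (PySem.Chars.find_nonneg_iff _ _).mpr (pv_singleton_infix.mpr hmem)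
  obtain ⟨hpre, hmin⟩ := PySem.Chars.find_spec h0
  set i := (PySem.Chars.find (w ++ c :: t) [c]).toNat with hi
  have hle : i ≤ w.length := by
    by_contra hlt
    push_neg at hlt
    exact hmin w.length hlt ⟨t, by simp⟩
  have hge : ¬ i < w.length := by
    intro hlt
    obtain ⟨r, hr⟩ := hpre
    rw [List.drop_append] at hr
    have h2 : i - w.length = 0 := by omega
    rw [h2, List.drop_zero] at hr
    cases hdw : List.drop i w with
    | nil =>
      have := List.drop_eq_nil_iff.mp hdw
      omega
    | cons a rest =>
      rw [hdw] at hr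
      simp only [List.cons_append, List.cons.injEq] at hr
      have ham : a ∈ w := List.mem_of_mem_drop (by rw [hdw]; simp)
      exact hw (hr.1 ▸ ham)
  have : i = w.length := by omega
  omega

lemma pv_go_m0 (c : Char) (fuel : Nat) (l cur : List Char) (acc : List (List Char)) :
    PySem.Chars.splitOnMax.go [c] fuel 0 l cur acc = ((cur.reverse ++ l) :: acc).reverse := by
  cases fuel with
  | zero => rw [PySem.Chars.splitOnMax.go.eq_def]
  | succ f =>
    cases l with
    | nil => rw [PySem.Chars.splitOnMax.go.eq_def]; simp
    | cons a rest => rw [PySem.Chars.splitOnMax.go.eq_def]; simp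

lemma pv_go_yes (c : Char) : ∀ (h : List Char), c ∉ h → ∀ (t cur : List Char) (acc : List (List Char)) (fuel : Nat),
    (h ++ c :: t).length < fuel →
    PySem.Chars.splitOnMax.go [c] fuel 1 (h ++ c :: t) cur acc =
      acc.reverse ++ [cur.reverse ++ h, t] := by
  intro h
  induction h with
  | nil =>
    intro _ t cur acc fuel hf
    cases fuel with
    | zero => simp at hf
    | succ f =>
      simp only [List.nil_append]
      rw [PySem.Chars.splitOnMax.go.eq_def]
      have hp : List.isPrefixOf [c] (c :: t) = true := by simp [List.isPrefixOf]
      simp only [hp, if_true]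
      norm_num
      rw [pv_go_m0]
      simp
  | cons a h' ih =>
    intro hw t cur acc fuel hf
    cases fuel with
    | zero => simp at hf
    | succ f =>
      simp only [List.cons_append]
      rw [PySem.Chars.splitOnMax.go.eq_def]
      have hac : ¬ a = c := fun hh => hw (by simp [hh])
      have hp : List.isPrefixOf [c] (a :: (h' ++ c :: t)) = false := by
        simp [List.isPrefixOf]; exact fun hh => absurd hh.symm hac
      simp only [hp, Bool.false_eq_true, if_false]
      norm_num
      rw [ih (fun hm => hw (List.mem_cons_of_mem a hm)) t (a :: cur) acc f (by simp at hf ⊢; omega)]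
      simp

lemma pv_find_neg {c : Char} {q : List Char} (h : c ∉ q) : PySem.Chars.find q [c] = -1 :=
  (PySem.Chars.find_eq_neg_one_iff q [c]).mpr (fun hin => h (pv_singleton_infix.mp hin))

lemma pv_first_unique {c : Char} : ∀ {w w' t r : List Char}, c ∉ w → c ∉ w' →
    w ++ c :: t = w' ++ c :: r → w = w' ∧ t = r := by
  intro w
  induction w with
  | nil =>
    intro w' t r _ hw' h
    cases w' with
    | nil => simpa using h
    | cons b w2 =>
      simp only [List.nil_append, List.cons_append, List.cons.injEq] at h
      exact absurd (h.1 ▸ List.mem_cons_self) hw'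
  | cons a w2 ih =>
    intro w' t r hw hw' h
    cases w' with
    | nil =>
      simp only [List.cons_append, List.nil_append, List.cons.injEq] at h
      exact absurd (h.1.symm ▸ List.mem_cons_self) hw
    | cons b w2' =>
      simp only [List.cons_append, List.cons.injEq] at h
      have := ih (fun hm => hw (List.mem_cons_of_mem a hm))
        (fun hm => hw' (List.mem_cons_of_mem b hm)) h.2
      exact ⟨by rw [h.1, this.1], this.2⟩

lemma pvSplitEqTail_eq {w t : List Char} (hw : '=' ∉ w) :
    pvSplitEqTail (w ++ '=' :: t) = t := by
  unfold pvSplitEqTail PySem.Chars.splitOnMax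
  rw [if_neg (by omega)]
  simp only [Int.toNat_one]
  rw [pv_go_yes '=' w hw t [] [] ((w ++ '=' :: t).length + 1) (by omega)]
  rfl

lemma pv_split₀_go_spec : ∀ (l cur : List Char) (acc : List (List Char)),
    (∀ p ∈ acc, p ≠ [] ∧ ∀ ch ∈ p, PySem.Chars.isspace ch = false) →
    (∀ ch ∈ cur, PySem.Chars.isspace ch = false) →
    ∀ p ∈ PySem.Chars.split₀.go l cur acc, p ≠ [] ∧ ∀ ch ∈ p, PySem.Chars.isspace ch = false := by
  intro l
  induction l with
  | nil =>
    intro cur acc hacc hcur p hp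
    rw [PySem.Chars.split₀.go] at hp
    by_cases hc : cur.isEmpty
    · rw [if_pos hc, List.mem_reverse] at hp; exact hacc p hp
    · rw [if_neg hc, List.mem_reverse, List.mem_cons] at hp
      rcases hp with rfl | hp
      · refine ⟨by simpa [List.isEmpty_iff] using hc, ?_⟩
        intro ch hch; exact hcur ch (by simpa using hch)
      · exact hacc p hp
  | cons c rest ih =>
    intro cur acc hacc hcur p hp
    rw [PySem.Chars.split₀.go] at hp
    by_cases hsp : PySem.Chars.isspace c
    · rw [if_pos hsp] at hp
      by_cases hc : cur.isEmpty
      · rw [if_pos hc] at hp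
        exact ih [] acc hacc (by simp) p hp
      · rw [if_neg hc] at hp
        refine ih [] _ ?_ (by simp) p hp
        intro p' hp'
        rcases List.mem_cons.mp hp' with rfl | h
        · exact ⟨by simpa [List.isEmpty_iff] using hc, fun ch hch => hcur ch (by simpa using hch)⟩
        · exact hacc p' h
    · rw [if_neg hsp] at hp
      refine ih (c :: cur) acc hacc ?_ p hp
      intro ch hch
      rcases List.mem_cons.mp hch with rfl | h
      · simpa using hsp
      · exact hcur ch h

lemma pv_split₀_spec (s : List Char) :
    ∀ p ∈ PySem.Chars.split₀ s, p ≠ [] ∧ ∀ ch ∈ p, PySem.Chars.isspace ch = false := by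
  exact pv_split₀_go_spec s [] [] (by simp) (by simp)

lemma pv_strip_id {p : List Char} (h : ∀ ch ∈ p, PySem.Chars.isspace ch = false) :
    PySem.Chars.strip p = p := by
  have h1 : PySem.Chars.lstrip p = p := by
    unfold PySem.Chars.lstrip
    cases p with
    | nil => rfl
    | cons a l => rw [List.dropWhile_cons_of_neg]; simp [h a (by simp)]
  unfold PySem.Chars.strip
  rw [h1]
  unfold PySem.Chars.rstrip
  cases hp : p.reverse with
  | nil => simp_all
  | cons a l =>
    rw [List.dropWhile_cons_of_neg]
    · rw [← hp, List.reverse_reverse]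
    · simp [h a (by rw [← List.mem_reverse, hp]; simp)]

lemma pv_startswith_word {q w' : List Char} {c : Char} :
    PySem.Chars.startswith q (w' ++ [c]) = true ↔ ∃ r, q = w' ++ c :: r := by
  rw [PySem.Chars.startswith_iff]
  constructor
  · rintro ⟨r, hr⟩; exact ⟨r, by rw [← hr]; simp⟩
  · rintro ⟨r, rfl⟩; exact ⟨r, by simp⟩

lemma pv_startswith_mem {q w' : List Char} {c : Char}
    (h : PySem.Chars.startswith q (w' ++ [c]) = true) : c ∈ q := by
  obtain ⟨r, rfl⟩ := pv_startswith_word.mp h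
  simp

lemma pv_sw_false {w w' t : List Char} {c : Char} (hw : c ∉ w) (hw' : c ∉ w') (hne : w ≠ w') :
    PySem.Chars.startswith (w ++ c :: t) (w' ++ [c]) = false := by
  rw [Bool.eq_false_iff]
  intro h
  obtain ⟨r, hr⟩ := pv_startswith_word.mp h
  exact hne (pv_first_unique hw hw' hr).1

lemma pv_sw_true {w t : List Char} {c : Char} :
    PySem.Chars.startswith (w ++ c :: t) (w ++ [c]) = true :=
  pv_startswith_word.mpr ⟨t, rfl⟩

lemma pv_sw_false_of_not_mem {q w' : List Char} {c : Char} (h : c ∉ q) :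
    PySem.Chars.startswith q (w' ++ [c]) = false := by
  rw [Bool.eq_false_iff]
  exact fun hs => h (pv_startswith_mem hs)

lemma pv_exists_first {c : Char} {q : List Char} (h : c ∈ q) :
    ∃ w t, q = w ++ c :: t ∧ c ∉ w := by
  induction q with
  | nil => cases h
  | cons a rest ih =>
    by_cases hac : a = c
    · subst hac; exact ⟨[], rest, by simp, by simp⟩
    · rcases ih (by rcases List.mem_cons.mp h with h | h; exact absurd h.symm hac; exact h) with ⟨w, t, rfl, hw⟩
      exact ⟨a :: w, t, rfl, by simp [hw, Ne.symm hac]⟩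

lemma pv_ne_of_mem {c : Char} {q w : List Char} (hc : c ∈ q) (hw : c ∉ w) : q ≠ w :=
  fun h => hw (h ▸ hc)


-- proof-side copies of the two step bodies, taking the already-stripped token q
def pvA' (mech : PySem.Dict String (List String)) (q : List Char) :
    PySem.Dict String (List String) :=
  match pvMatchPrefix q pvPrefixTable with
  | some (key, v) => pvAppend mech key (String.ofList v)
  | none =>
    if q = "mx".toList then pvAppend mech "mx" "mx"
    else if q = "a".toList then pvAppend mech "a" "a"
    else if PySem.Chars.startswith q "a:".toList then
      pvAppend mech "a" (String.ofList (PySem.List.slice q (some 2) none))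
    else if PySem.Chars.startswith q "mx:".toList then
      pvAppend mech "mx" (String.ofList (PySem.List.slice q (some 3) none))
    else if q = "ptr".toList then pvAppend mech "ptr" "ptr"
    else if q = "all".toList then pvAppend mech "all" "all"
    else if PySem.Chars.startswith q "redirect=".toList then
      pvAppend mech "redirect" (String.ofList (pvSplitEqTail q))
    else if PySem.Chars.startswith q "exp=".toList then
      pvAppend mech "exp" (String.ofList (pvSplitEqTail q))
    else mech

def pvB' (mech : PySem.Dict String (List String)) (q : List Char) :
    PySem.Dict String (List String) :=
  if 0 ≤ PySem.Chars.find q [':'] ∧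
      pvCOLON.contains (String.ofList (PySem.List.slice q none (some (PySem.Chars.find q [':'])))) then
    pvAppend mech (String.ofList (PySem.List.slice q none (some (PySem.Chars.find q [':']))))
      (String.ofList (PySem.List.slice q (some (PySem.Chars.find q [':'] + 1)) none))
  else if 0 ≤ PySem.Chars.find q ['='] ∧
      pvEQ.contains (String.ofList (PySem.List.slice q none (some (PySem.Chars.find q ['='])))) then
    pvAppend mech (String.ofList (PySem.List.slice q none (some (PySem.Chars.find q ['=']))))
      (String.ofList (PySem.List.slice q (some (PySem.Chars.find q ['='] + 1)) none))
  else if pvBARE.contains (String.ofList q) then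
    pvAppend mech (String.ofList q) (String.ofList q)
  else mech

lemma pvStepA_eval (mech : PySem.Dict String (List String)) (tok : List Char) :
    pvStepA mech tok = pvA' mech (pvStrip1 tok) := rfl

lemma pvStepB_eval (mech : PySem.Dict String (List String)) (tok : List Char) :
    pvStepB mech tok = pvB' mech (pvStrip1 tok) := rfl

lemma pv_colon_mem_iff (h : List Char) : pvCOLON.contains (String.ofList h) = true ↔
    (h = "ip4".toList ∨ h = "ip6".toList ∨ h = "include".toList ∨ h = "exists".toList ∨ h = "a".toList ∨ h = "mx".toList) := by
  have hv : pvCOLON = ["ip4", "ip6", "include", "exists", "a", "mx"] := by decide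
  rw [hv]; simp [PySem.Set.contains, ← String.ofList_inj]

lemma pv_eq_mem_iff (h : List Char) : pvEQ.contains (String.ofList h) = true ↔
    (h = "redirect".toList ∨ h = "exp".toList) := by
  have hv : pvEQ = ["redirect", "exp"] := by decide
  rw [hv]; simp [PySem.Set.contains, ← String.ofList_inj]

lemma pv_bare_mem_iff (h : List Char) : pvBARE.contains (String.ofList h) = true ↔
    (h = "mx".toList ∨ h = "a".toList ∨ h = "ptr".toList ∨ h = "all".toList) := by
  have hv : pvBARE = ["mx", "a", "ptr", "all"] := by decide
  rw [hv]; simp [PySem.Set.contains, ← String.ofList_inj]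

lemma pv_slice_take (q : List Char) (n : Nat) :
    PySem.List.slice q none (some (n : Int)) = q.take n := PySem.List.slice_to_natCast q n

lemma pv_slice_drop1 (q : List Char) (n : Nat) :
    PySem.List.slice q (some ((n : Int) + 1)) none = q.drop (n + 1) := by
  have h1 : ((n : Int) + 1) = ((n + 1 : Nat) : Int) := by push_cast; ring
  rw [h1, PySem.List.slice_from q (by positivity)]
  simp

lemma pv_take_head {w t : List Char} {c : Char} : (w ++ c :: t).take w.length = w := by simp

lemma pv_drop_tail {w t : List Char} {c : Char} : (w ++ c :: t).drop (w.length + 1) = t := by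
  rw [show w ++ c :: t = (w ++ [c]) ++ t by simp]
  rw [List.drop_left' (by simp)]

-- B's step on a token whose first-':' head is one of the COLON words
lemma pvB'_colon (mech : PySem.Dict String (List String)) {w t : List Char} (hw : ':' ∉ w)
    (hcol : w = "ip4".toList ∨ w = "ip6".toList ∨ w = "include".toList ∨
      w = "exists".toList ∨ w = "a".toList ∨ w = "mx".toList) :
    pvB' mech (w ++ ':' :: t) = pvAppend mech (String.ofList w) (String.ofList t) := by
  unfold pvB'
  rw [pv_find_first hw, pv_slice_take, pv_take_head, pv_slice_drop1, pv_drop_tail,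
    if_pos ⟨by positivity, (pv_colon_mem_iff w).mpr hcol⟩]

-- A's chain when none of the first ten tests fire
lemma pvA'_tail (mech : PySem.Dict String (List String)) (q : List Char)
    (h1 : PySem.Chars.startswith q "ip4:".toList = false)
    (h2 : PySem.Chars.startswith q "ip6:".toList = false)
    (h3 : PySem.Chars.startswith q "include:".toList = false)
    (h4 : PySem.Chars.startswith q "exists:".toList = false)
    (h5 : q ≠ "mx".toList) (h6 : q ≠ "a".toList)
    (h7 : PySem.Chars.startswith q "a:".toList = false)
    (h8 : PySem.Chars.startswith q "mx:".toList = false)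
    (h9 : q ≠ "ptr".toList) (h10 : q ≠ "all".toList) :
    pvA' mech q =
      (if PySem.Chars.startswith q "redirect=".toList then
        pvAppend mech "redirect" (String.ofList (pvSplitEqTail q))
      else if PySem.Chars.startswith q "exp=".toList then
        pvAppend mech "exp" (String.ofList (pvSplitEqTail q))
      else mech) := by
  unfold pvA'
  simp only [pvMatchPrefix, pvPrefixTable, h1, h2, h3, h4, Bool.false_eq_true, if_false]
  simp only [h7, h8, Bool.false_eq_true, if_false, if_neg h5, if_neg h6, if_neg h9, if_neg h10]

lemma pv_core (mech : PySem.Dict String (List String)) (q : List Char) :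
    pvA' mech q = pvB' mech q := by
  by_cases hc : ':' ∈ q
  · obtain ⟨w, t, hq1, hw⟩ := pv_exists_first hc
    by_cases hcol : w = "ip4".toList ∨ w = "ip6".toList ∨ w = "include".toList ∨
        w = "exists".toList ∨ w = "a".toList ∨ w = "mx".toList
    · subst hq1
      rw [pvB'_colon mech hw hcol]
      rcases hcol with rfl | rfl | rfl | rfl | rfl | rfl <;>
        simp [pvA', pvMatchPrefix, pvPrefixTable, PySem.Chars.startswith,
          List.isPrefixOf, PySem.List.slice]
    · push_neg at hcol
      obtain ⟨hn1, hn2, hn3, hn4, hn5, hn6⟩ := hcol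
      -- B: first branch is off
      have hfc : PySem.Chars.find q [':'] = (w.length : Int) := by
        rw [hq1]; exact pv_find_first hw
      have hslc : PySem.List.slice q none (some ((w.length : Nat) : Int)) = w := by
        rw [hq1, pv_slice_take, pv_take_head]
      have hcond1 : ¬(0 ≤ PySem.Chars.find q [':'] ∧
          pvCOLON.contains (String.ofList (PySem.List.slice q none (some (PySem.Chars.find q [':'])))) = true) := by
        rw [hfc, hslc]
        rintro ⟨-, hmem⟩
        rcases (pv_colon_mem_iff w).mp hmem with h | h | h | h | h | h
        exacts [hn1 h, hn2 h, hn3 h, hn4 h, hn5 h, hn6 h]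
      -- A: the ten leading tests are off
      have sw1 : PySem.Chars.startswith q "ip4:".toList = false := by
        rw [hq1, show ("ip4:".toList) = "ip4".toList ++ [':'] by decide]
        exact pv_sw_false hw (by decide) hn1
      have sw2 : PySem.Chars.startswith q "ip6:".toList = false := by
        rw [hq1, show ("ip6:".toList) = "ip6".toList ++ [':'] by decide]
        exact pv_sw_false hw (by decide) hn2
      have sw3 : PySem.Chars.startswith q "include:".toList = false := by
        rw [hq1, show ("include:".toList) = "include".toList ++ [':'] by decide]
        exact pv_sw_false hw (by decide) hn3
      have sw4 : PySem.Chars.startswith q "exists:".toList = false := by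
        rw [hq1, show ("exists:".toList) = "exists".toList ++ [':'] by decide]
        exact pv_sw_false hw (by decide) hn4
      have sw7 : PySem.Chars.startswith q "a:".toList = false := by
        rw [hq1, show ("a:".toList) = "a".toList ++ [':'] by decide]
        exact pv_sw_false hw (by decide) hn5
      have sw8 : PySem.Chars.startswith q "mx:".toList = false := by
        rw [hq1, show ("mx:".toList) = "mx".toList ++ [':'] by decide]
        exact pv_sw_false hw (by decide) hn6
      rw [pvA'_tail mech q sw1 sw2 sw3 sw4
        (pv_ne_of_mem hc (by decide)) (pv_ne_of_mem hc (by decide)) sw7 sw8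
        (pv_ne_of_mem hc (by decide)) (pv_ne_of_mem hc (by decide))]
      unfold pvB'
      rw [if_neg hcond1]
      have hbare : ¬ pvBARE.contains (String.ofList q) = true := by
        intro hmem
        rcases (pv_bare_mem_iff q).mp hmem with h | h | h | h <;>
          exact pv_ne_of_mem hc (by decide) h
      by_cases he : '=' ∈ q
      · obtain ⟨w2, t2, hq2, hw2⟩ := pv_exists_first he
        have hfe : PySem.Chars.find q ['='] = (w2.length : Int) := by
          rw [hq2]; exact pv_find_first hw2
        have hsle : PySem.List.slice q none (some ((w2.length : Nat) : Int)) = w2 := by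
          rw [hq2, pv_slice_take, pv_take_head]
        have hsde : PySem.List.slice q (some (((w2.length : Nat) : Int) + 1)) none = t2 := by
          rw [hq2, pv_slice_drop1, pv_drop_tail]
        have htail : pvSplitEqTail q = t2 := by
          rw [hq2]; exact pvSplitEqTail_eq hw2
        rw [hfe, hsle, hsde]
        by_cases h2 : w2 = "redirect".toList ∨ w2 = "exp".toList
        · rcases h2 with rfl | rfl
          · have swr : PySem.Chars.startswith q "redirect=".toList = true := by
              rw [hq2, show ("redirect=".toList) = "redirect".toList ++ ['='] by decide]
              exact pv_sw_true
            rw [swr, htail]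
            have hm : ("redirect" : String) ∈ pvEQ := by decide
            simp [hm]
          · have swrF : PySem.Chars.startswith q "redirect=".toList = false := by
              rw [hq2, show ("redirect=".toList) = "redirect".toList ++ ['='] by decide]
              exact pv_sw_false (by decide) (by decide) (by decide)
            have swe : PySem.Chars.startswith q "exp=".toList = true := by
              rw [hq2, show ("exp=".toList) = "exp".toList ++ ['='] by decide]
              exact pv_sw_true
            rw [swrF, swe, htail]
            have hm : ("exp" : String) ∈ pvEQ := by decide
            simp [hm]
        · push_neg at h2
          have swrF : PySem.Chars.startswith q "redirect=".toList = false := by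
            rw [hq2, show ("redirect=".toList) = "redirect".toList ++ ['='] by decide]
            exact pv_sw_false hw2 (by decide) h2.1
          have sweF : PySem.Chars.startswith q "exp=".toList = false := by
            rw [hq2, show ("exp=".toList) = "exp".toList ++ ['='] by decide]
            exact pv_sw_false hw2 (by decide) h2.2
          have hcond2 : ¬(0 ≤ ((w2.length : Nat) : Int) ∧
              pvEQ.contains (String.ofList w2) = true) := by
            rintro ⟨-, hmem⟩
            rcases (pv_eq_mem_iff w2).mp hmem with h | h
            exacts [h2.1 h, h2.2 h]
          rw [swrF, sweF, if_neg hcond2, if_neg hbare]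
          simp
      · have hfe : PySem.Chars.find q ['='] = -1 := pv_find_neg he
        have swrF : PySem.Chars.startswith q "redirect=".toList = false := by
          rw [show ("redirect=".toList) = "redirect".toList ++ ['='] by decide]
          exact pv_sw_false_of_not_mem he
        have sweF : PySem.Chars.startswith q "exp=".toList = false := by
          rw [show ("exp=".toList) = "exp".toList ++ ['='] by decide]
          exact pv_sw_false_of_not_mem he
        have hcond2 : ¬((0:Int) ≤ -1 ∧
            pvEQ.contains (String.ofList (PySem.List.slice q none (some (-1)))) = true) := by
          rintro ⟨h0, -⟩; omega
        rw [swrF, sweF, hfe, if_neg hcond2, if_neg hbare]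
        simp
  · -- no ':' in q
    have hfc : PySem.Chars.find q [':'] = -1 := pv_find_neg hc
    have sw1 : PySem.Chars.startswith q "ip4:".toList = false := by
      rw [show ("ip4:".toList) = "ip4".toList ++ [':'] by decide]
      exact pv_sw_false_of_not_mem hc
    have sw2 : PySem.Chars.startswith q "ip6:".toList = false := by
      rw [show ("ip6:".toList) = "ip6".toList ++ [':'] by decide]
      exact pv_sw_false_of_not_mem hc
    have sw3 : PySem.Chars.startswith q "include:".toList = false := by
      rw [show ("include:".toList) = "include".toList ++ [':'] by decide]
      exact pv_sw_false_of_not_mem hc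
    have sw4 : PySem.Chars.startswith q "exists:".toList = false := by
      rw [show ("exists:".toList) = "exists".toList ++ [':'] by decide]
      exact pv_sw_false_of_not_mem hc
    have sw7 : PySem.Chars.startswith q "a:".toList = false := by
      rw [show ("a:".toList) = "a".toList ++ [':'] by decide]
      exact pv_sw_false_of_not_mem hc
    have sw8 : PySem.Chars.startswith q "mx:".toList = false := by
      rw [show ("mx:".toList) = "mx".toList ++ [':'] by decide]
      exact pv_sw_false_of_not_mem hc
    have hcond1 : ¬((0:Int) ≤ -1 ∧
        pvCOLON.contains (String.ofList (PySem.List.slice q none (some (-1)))) = true) := by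
      rintro ⟨h0, -⟩; omega
    by_cases he : '=' ∈ q
    · obtain ⟨w2, t2, hq2, hw2⟩ := pv_exists_first he
      have hfe : PySem.Chars.find q ['='] = (w2.length : Int) := by
        rw [hq2]; exact pv_find_first hw2
      have hsle : PySem.List.slice q none (some ((w2.length : Nat) : Int)) = w2 := by
        rw [hq2, pv_slice_take, pv_take_head]
      have hsde : PySem.List.slice q (some (((w2.length : Nat) : Int) + 1)) none = t2 := by
        rw [hq2, pv_slice_drop1, pv_drop_tail]
      have htail : pvSplitEqTail q = t2 := by
        rw [hq2]; exact pvSplitEqTail_eq hw2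
      have hbare : ¬ pvBARE.contains (String.ofList q) = true := by
        intro hmem
        rcases (pv_bare_mem_iff q).mp hmem with h | h | h | h <;>
          exact pv_ne_of_mem he (by decide) h
      rw [pvA'_tail mech q sw1 sw2 sw3 sw4
        (pv_ne_of_mem he (by decide)) (pv_ne_of_mem he (by decide)) sw7 sw8
        (pv_ne_of_mem he (by decide)) (pv_ne_of_mem he (by decide))]
      unfold pvB'
      rw [hfc, if_neg hcond1, hfe, hsle, hsde]
      by_cases h2 : w2 = "redirect".toList ∨ w2 = "exp".toList
      · rcases h2 with rfl | rfl
        · have swr : PySem.Chars.startswith q "redirect=".toList = true := by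
            rw [hq2, show ("redirect=".toList) = "redirect".toList ++ ['='] by decide]
            exact pv_sw_true
          rw [swr, htail]
          have hm : ("redirect" : String) ∈ pvEQ := by decide
          simp [hm]
        · have swrF : PySem.Chars.startswith q "redirect=".toList = false := by
            rw [hq2, show ("redirect=".toList) = "redirect".toList ++ ['='] by decide]
            exact pv_sw_false (by decide) (by decide) (by decide)
          have swe : PySem.Chars.startswith q "exp=".toList = true := by
            rw [hq2, show ("exp=".toList) = "exp".toList ++ ['='] by decide]
            exact pv_sw_true
          rw [swrF, swe, htail]
          have hm : ("exp" : String) ∈ pvEQ := by decide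
          simp [hm]
      · push_neg at h2
        have swrF : PySem.Chars.startswith q "redirect=".toList = false := by
          rw [hq2, show ("redirect=".toList) = "redirect".toList ++ ['='] by decide]
          exact pv_sw_false hw2 (by decide) h2.1
        have sweF : PySem.Chars.startswith q "exp=".toList = false := by
          rw [hq2, show ("exp=".toList) = "exp".toList ++ ['='] by decide]
          exact pv_sw_false hw2 (by decide) h2.2
        have hcond2 : ¬(0 ≤ ((w2.length : Nat) : Int) ∧
            pvEQ.contains (String.ofList w2) = true) := by
          rintro ⟨-, hmem⟩
          rcases (pv_eq_mem_iff w2).mp hmem with h | h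
          exacts [h2.1 h, h2.2 h]
        rw [swrF, sweF, if_neg hcond2, if_neg hbare]
        simp
    · have hfe : PySem.Chars.find q ['='] = -1 := pv_find_neg he
      have swrF : PySem.Chars.startswith q "redirect=".toList = false := by
        rw [show ("redirect=".toList) = "redirect".toList ++ ['='] by decide]
        exact pv_sw_false_of_not_mem he
      have sweF : PySem.Chars.startswith q "exp=".toList = false := by
        rw [show ("exp=".toList) = "exp".toList ++ ['='] by decide]
        exact pv_sw_false_of_not_mem he
      have hcond2 : ¬((0:Int) ≤ -1 ∧
          pvEQ.contains (String.ofList (PySem.List.slice q none (some (-1)))) = true) := by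
        rintro ⟨h0, -⟩; omega
      by_cases hb4 : q = "mx".toList ∨ q = "a".toList ∨ q = "ptr".toList ∨ q = "all".toList
      · rcases hb4 with rfl | rfl | rfl | rfl <;> rfl
      · push_neg at hb4
        rw [pvA'_tail mech q sw1 sw2 sw3 sw4 hb4.1 hb4.2.1 sw7 sw8 hb4.2.2.1 hb4.2.2.2]
        have hbare : ¬ pvBARE.contains (String.ofList q) = true := by
          intro hmem
          rcases (pv_bare_mem_iff q).mp hmem with h | h | h | h
          exacts [hb4.1 h, hb4.2.1 h, hb4.2.2.1 h, hb4.2.2.2 h]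
        unfold pvB'
        rw [hfc, if_neg hcond1, hfe, if_neg hcond2, if_neg hbare, swrF, sweF]
        simp

lemma pv_tokensA_eq (spf : String) : pvTokensA spf = PySem.Chars.split₀ spf.toList := by
  unfold pvTokensA
  have hs := pv_split₀_spec spf.toList
  rw [List.filter_eq_self.mpr, List.map_congr_left (g := id), List.map_id]
  · intro p hp
    rw [pv_strip_id (hs p hp).2]
    rfl
  · intro p hp
    simp [pv_strip_id (hs p hp).2, (hs p hp).1]

lemma pvStep_eq (mech : PySem.Dict String (List String)) (tok : List Char) :
    pvStepA mech tok = pvStepB mech tok := by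
  rw [pvStepA_eval, pvStepB_eval, pv_core]

-- ===== VERDICT (by name: the statement is the Claim_ definition above) =====
theorem parse_spf_spec : Claim_equal_parse_spf := by
  intro spf _
  unfold Spec_parse_spf parse_spf parse_spf_alt
  rw [pv_tokensA_eq]
  have hstep : pvStepA = pvStepB := funext fun m => funext fun t => pvStep_eq m t
  by_cases h : spf = ""
  · subst h
    rfl
  · rw [if_neg h, hstep]
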